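-- pv_equiv track=rewrite | github.com/dadak797/constant | src/icon/IconFileParser.py | generate_imgui_code
-- ===== SOURCE A (Python) =====
-- def generate_imgui_code(fileName, iconMacros):
--     iconfileName = fileName.split('.')[0]  # Remove extension
--
--     code = f'ImGui::Begin("{iconfileName}", openWindow);\n'
--     code += f'if (ImGui::BeginTable("Table-{iconfileName}", 5, flags)) {{\n'
--
--     columeCount = 5
--     for (index, macro) in enumerate(iconMacros):
--         columeIndex = index % columeCount
--         if columeIndex == 0: code += f'    ImGui::TableNextRow();\n'
--         code += f'    ImGui::TableSetColumnIndex({columeIndex}); ImGui::Text({macro}"  {macro}");\n'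
--
--     code += '    ImGui::EndTable();\n'
--     code += '}\nImGui::End();'
--
--     return code
-- ===== SOURCE B (Python) =====
-- def generate_imgui_code(fileName, iconMacros):
--     iconfileName = fileName.split('.')[0]  # Remove extension
--     rows = [iconMacros[i:i + 5] for i in range(0, len(iconMacros), 5)]
--     lines = [f'ImGui::Begin("{iconfileName}", openWindow);\n',
--              f'if (ImGui::BeginTable("Table-{iconfileName}", 5, flags)) {{\n']
--     for row in rows:
--         lines.append('    ImGui::TableNextRow();\n')
--         for col, macro in enumerate(row):
--             lines.append(f'    ImGui::TableSetColumnIndex({col}); ImGui::Text({macro}"  {macro}");\n')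
--     lines.append('    ImGui::EndTable();\n')
--     lines.append('}\nImGui::End();')
--     return ''.join(lines)
-- ===== Notes on version B (the rewrite author's own statement) =====
-- stated objective: alternative
-- what changed: B pre-partitions the macros into rows of 5 and emits the table with a nested rows/columns loop over a list of lines joined at the end, instead of A's flat single pass that tracks the column as index % 5 and concatenates onto one string.
import Mathlib
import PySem

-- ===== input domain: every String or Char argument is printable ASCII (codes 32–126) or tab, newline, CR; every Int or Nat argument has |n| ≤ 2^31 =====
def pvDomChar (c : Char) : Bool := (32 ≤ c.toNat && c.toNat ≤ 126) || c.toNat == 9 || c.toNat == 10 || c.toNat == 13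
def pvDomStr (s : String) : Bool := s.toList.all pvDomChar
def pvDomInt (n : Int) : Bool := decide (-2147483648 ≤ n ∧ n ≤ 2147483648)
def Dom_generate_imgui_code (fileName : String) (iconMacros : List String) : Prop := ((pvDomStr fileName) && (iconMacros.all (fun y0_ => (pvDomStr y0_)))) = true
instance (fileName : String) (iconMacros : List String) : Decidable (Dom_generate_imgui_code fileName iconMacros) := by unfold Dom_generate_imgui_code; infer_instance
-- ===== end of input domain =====

-- B re-groups the macros into rows of 5 and emits the table by a nested rows/columns
-- loop over a list of lines joined at the end, instead of A's flat index%5 pass; same output, alternative decomposition.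

-- ===== PORT A =====
-- the body of A's for-loop (index, macro) ↦ updated code string
def pvStepA (code : String) (im : Int × String) : String :=
  let columeIndex := PySem.Int.mod im.1 5
  let code := if columeIndex = 0 then code ++ "    ImGui::TableNextRow();\n" else code
  code ++ ("    ImGui::TableSetColumnIndex(" ++ PySem.Int.toStr columeIndex ++ "); ImGui::Text(" ++ im.2 ++ "\"  " ++ im.2 ++ "\");\n")

def generate_imgui_code (fileName : String) (iconMacros : List String) : String :=
  -- fileName.split('.')[0]: split with a nonempty separator always yields a nonempty list, so [0] is its head
  let iconfileName := ((PySem.Str.split? fileName ".").getD []).headD ""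
  let code := "ImGui::Begin(\"" ++ iconfileName ++ "\", openWindow);\n"
  let code := code ++ ("if (ImGui::BeginTable(\"Table-" ++ iconfileName ++ "\", 5, flags)) {\n")
  let code := (PySem.List.enumerate iconMacros).foldl pvStepA code
  let code := code ++ "    ImGui::EndTable();\n"
  let code := code ++ "}\nImGui::End();"
  code

-- ===== PORT B =====
-- rows = [iconMacros[i:i+5] for i in range(0, len(iconMacros), 5)]
def pvChunks5 (xs : List String) : List (List String) :=
  if h : xs = [] then [] else xs.take 5 :: pvChunks5 (xs.drop 5)
termination_by xs.length
decreasing_by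
  simp only [List.length_drop]
  have : xs.length ≠ 0 := fun h0 => h (List.eq_nil_of_length_eq_zero h0)
  omega

-- one f'    ImGui::TableSetColumnIndex({col}); …' line
def pvCell (col : Int) (m : String) : String :=
  "    ImGui::TableSetColumnIndex(" ++ PySem.Int.toStr col ++ "); ImGui::Text(" ++ m ++ "\"  " ++ m ++ "\");\n"

-- body of B's inner loop: lines.append(cell)
def pvStepB (lines : List String) (cm : Int × String) : List String :=
  lines ++ [pvCell cm.1 cm.2]

-- body of B's outer loop: append the TableNextRow line, then the inner enumerate loop
def pvRowStep (lines : List String) (row : List String) : List String :=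
  (PySem.List.enumerate row).foldl pvStepB (lines ++ ["    ImGui::TableNextRow();\n"])

def generate_imgui_code_alt (fileName : String) (iconMacros : List String) : String :=
  let iconfileName := ((PySem.Str.split? fileName ".").getD []).headD ""
  let rows := pvChunks5 iconMacros
  let lines := ["ImGui::Begin(\"" ++ iconfileName ++ "\", openWindow);\n",
                "if (ImGui::BeginTable(\"Table-" ++ iconfileName ++ "\", 5, flags)) {\n"]
  let lines := rows.foldl pvRowStep lines
  let lines := lines ++ ["    ImGui::EndTable();\n"]
  let lines := lines ++ ["}\nImGui::End();"]
  String.join lines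

-- ===== PRECONDITION & SPEC =====
def Spec_generate_imgui_code (fileName : String) (iconMacros : List String) (out : String) : Prop := out = generate_imgui_code_alt fileName iconMacros
instance (fileName : String) (iconMacros : List String) (out : String) : Decidable (Spec_generate_imgui_code fileName iconMacros out) := by unfold Spec_generate_imgui_code; infer_instance

-- ===== CLAIM (what is proved, stated in full; the proofs are below) =====
def Claim_equal_generate_imgui_code : Prop := ∀ (fileName : String) (iconMacros : List String), Dom_generate_imgui_code fileName iconMacros → Spec_generate_imgui_code fileName iconMacros (generate_imgui_code fileName iconMacros)

-- ===== LEMMAS AND PROOFS =====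

-- the lines one row of B contributes
def pvRowLines (row : List String) : List String :=
  "    ImGui::TableNextRow();\n" :: (PySem.List.enumerate row).map (fun cm => pvCell cm.1 cm.2)

lemma pv_join_nil : String.join ([] : List String) = "" := rfl

lemma pv_join_foldl_init (l : List String) (x y : String) :
    l.foldl (· ++ ·) (x ++ y) = x ++ l.foldl (· ++ ·) y := by
  induction l generalizing y with
  | nil => rfl
  | cons a t ih => simp only [List.foldl_cons, String.append_assoc, ih]

lemma pv_join_cons (a : String) (l : List String) :
    String.join (a :: l) = a ++ String.join l := by
  show List.foldl (· ++ ·) "" (a :: l) = a ++ List.foldl (· ++ ·) "" l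
  rw [List.foldl_cons, show ("" ++ a : String) = a ++ "" from by simp]
  exact pv_join_foldl_init l a ""

lemma pv_join_append (l1 l2 : List String) :
    String.join (l1 ++ l2) = String.join l1 ++ String.join l2 := by
  induction l1 with
  | nil => simp [pv_join_nil]
  | cons a t ih => simp only [List.cons_append, pv_join_cons, ih, String.append_assoc]

lemma pv_mod5 (k : Nat) (i : Int) (h0 : 0 ≤ i) (h5 : i < 5) :
    PySem.Int.mod (5 * (k : Int) + i) 5 = i := by
  rw [PySem.Int.mod_eq_emod_of_pos (by norm_num)]
  omega

lemma pv_foldB (rows : List (List String)) (lines : List String) :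
    rows.foldl pvRowStep lines = lines ++ rows.flatMap pvRowLines := by
  induction rows generalizing lines with
  | nil => simp
  | cons r t ih =>
    rw [List.foldl_cons, ih]
    have hstep : pvStepB = fun (lines : List String) (cm : Int × String) => lines ++ [pvCell cm.1 cm.2] := rfl
    simp only [pvRowStep, hstep, PySem.List.foldl_append_singleton_eq_map]
    simp [pvRowLines, List.flatMap_cons]

-- one chunk (length 1..5) of A's flat loop produces exactly that row's lines
lemma pv_chunk (chunk : List String) (k : Nat) (code : String)
    (hne : chunk ≠ []) (hle : chunk.length ≤ 5) :
    (PySem.List.enumerate chunk (5 * (k : Int))).foldl pvStepA code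
      = code ++ String.join (pvRowLines chunk) := by
  have m0 : PySem.Int.mod (5 * (k : Int)) 5 = 0 := by
    have := pv_mod5 k 0 (by norm_num) (by norm_num); rwa [add_zero] at this
  have m1 := pv_mod5 k 1 (by norm_num) (by norm_num)
  have m2 := pv_mod5 k 2 (by norm_num) (by norm_num)
  have m3 := pv_mod5 k 3 (by norm_num) (by norm_num)
  have m4 := pv_mod5 k 4 (by norm_num) (by norm_num)
  rcases chunk with _ | ⟨a, _ | ⟨b, _ | ⟨c, _ | ⟨d, _ | ⟨e, _ | ⟨f, rest⟩⟩⟩⟩⟩⟩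
  · exact absurd rfl hne
  all_goals first
  | (simp only [List.length_cons] at hle; omega)
  | (simp only [PySem.List.enumerate_cons, PySem.List.enumerate_nil, List.foldl_cons,
        List.foldl_nil, pvStepA, pvRowLines, List.map_cons, List.map_nil]
     try rw [show (5*(k:Int)+1+1) = 5*(k:Int)+2 from by ring]
     try rw [show (5*(k:Int)+2+1) = 5*(k:Int)+3 from by ring]
     try rw [show (5*(k:Int)+3+1) = 5*(k:Int)+4 from by ring]
     rw [m0]
     try rw [m1]
     try rw [m2]
     try rw [m3]
     try rw [m4]
     norm_num [pv_join_cons, pv_join_nil, pvCell, String.append_assoc])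

lemma pv_loopA (xs : List String) (k : Nat) (code : String) :
    (PySem.List.enumerate xs (5 * (k : Int))).foldl pvStepA code
      = code ++ String.join ((pvChunks5 xs).flatMap pvRowLines) := by
  induction xs using pvChunks5.induct generalizing k code with
  | case1 =>
    simp [pvChunks5, PySem.List.enumerate_nil, pv_join_nil]
  | case2 xs h ih =>
    rw [pvChunks5, dif_neg h]
    conv_lhs => rw [← List.take_append_drop 5 xs]
    rw [PySem.List.enumerate_append, List.foldl_append]
    have htake_ne : xs.take 5 ≠ [] := by
      intro h0
      refine h (List.eq_nil_of_length_eq_zero ?_)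
      have := congrArg List.length h0
      simp only [List.length_take, List.length_nil] at this
      omega
    rw [pv_chunk (xs.take 5) k code htake_ne (by simp [List.length_take])]
    by_cases hlen : 5 ≤ xs.length
    · have hlt : (xs.take 5).length = 5 := by simp [List.length_take]; omega
      rw [hlt, show (5 * (k : Int) + ((5 : Nat) : Int)) = 5 * (((k + 1 : Nat)) : Int) from by
        push_cast; ring]
      rw [ih (k + 1)]
      simp [List.flatMap_cons, pv_join_append, String.append_assoc]
    · have hdrop : xs.drop 5 = [] := List.eq_nil_of_length_eq_zero (by simp; omega)
      rw [hdrop]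
      simp [pvChunks5, PySem.List.enumerate_nil, List.flatMap_cons]

lemma pv_loopA0 (xs : List String) (code : String) :
    (PySem.List.enumerate xs 0).foldl pvStepA code
      = code ++ String.join ((pvChunks5 xs).flatMap pvRowLines) := by
  simpa using pv_loopA xs 0 code

-- ===== VERDICT (by name: the statement is the Claim_ definition above) =====
theorem generate_imgui_code_spec : Claim_equal_generate_imgui_code := by
  intro fileName iconMacros _
  show generate_imgui_code fileName iconMacros = generate_imgui_code_alt fileName iconMacros
  unfold generate_imgui_code generate_imgui_code_alt
  simp only [pv_foldB, pv_loopA0, pv_join_append, pv_join_cons, pv_join_nil,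
    String.append_empty, String.append_assoc]
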